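-- pv_equiv track=rewrite | github.com/nitrogen27/tic-tac-toe-transform | apps/api/src/gomoku_api/ws/arena_eval.py | _nxn_winner
-- ===== SOURCE A (Python) =====
-- def _nxn_winner(board: list[int], n: int, win_len: int, last_move: int) -> int:
--     if last_move < 0:
--         return 0
--     player = board[last_move]
--     if player == 0:
--         return 0
--     row, col = divmod(last_move, n)
--     for dr, dc in ((0, 1), (1, 0), (1, 1), (1, -1)):
--         count = 1
--         for step in range(1, win_len):
--             nr, nc = row + dr * step, col + dc * step
--             if 0 <= nr < n and 0 <= nc < n and board[nr * n + nc] == player: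
--                 count += 1
--             else:
--                 break
--         for step in range(1, win_len):
--             nr, nc = row - dr * step, col - dc * step
--             if 0 <= nr < n and 0 <= nc < n and board[nr * n + nc] == player:
--                 count += 1
--             else:
--                 break
--         if count >= win_len:
--             return player
--     return 0
-- ===== SOURCE B (Python) =====
-- def _nxn_winner(board: list[int], n: int, win_len: int, last_move: int) -> int:
--     if last_move < 0:
--         return 0
--     player = board[last_move]
--     if player == 0:
--         return 0
--     row, col = divmod(last_move, n)
--
--     def run_from(seq):
--         t = 0
--         for v in seq:
--             if v != player:
--                 break
--             t += 1
--         return t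
--
--     for dr, dc in ((0, 1), (1, 0), (1, 1), (1, -1)):
--         # materialize the in-bounds cells of the line through last_move
--         cells = []
--         center = 0
--         for k in range(-(win_len - 1), win_len):
--             r, c = row + dr * k, col + dc * k
--             if 0 <= r < n and 0 <= c < n:
--                 if k == 0:
--                     center = len(cells)
--                 cells.append(board[r * n + c])
--         if 1 + run_from(cells[center + 1:]) + run_from(reversed(cells[:center])) >= win_len:
--             return player
--     return 0
-- ===== Notes on version B (the rewrite author's own statement) =====
-- stated objective: alternative
-- what changed: Per direction, B materializes the clipped in-bounds line of cells through last_move once (recording the center's index) and then measures the player's run around the center purely on that list, instead of A's per-step coordinate recomputation and bounds re-checking in two separate board walks.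
-- outside the precondition, e.g. on _nxn_winner([-2, 0, 2, 2, -2, -1, -2, 1, 2, -2, 2], 3, 2, 10): A returns 2, B returns 0; on _nxn_winner([0, 1, 0, 1, 0, 2], 3, 3, 1): A returns 0, B raises IndexError
import Mathlib
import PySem

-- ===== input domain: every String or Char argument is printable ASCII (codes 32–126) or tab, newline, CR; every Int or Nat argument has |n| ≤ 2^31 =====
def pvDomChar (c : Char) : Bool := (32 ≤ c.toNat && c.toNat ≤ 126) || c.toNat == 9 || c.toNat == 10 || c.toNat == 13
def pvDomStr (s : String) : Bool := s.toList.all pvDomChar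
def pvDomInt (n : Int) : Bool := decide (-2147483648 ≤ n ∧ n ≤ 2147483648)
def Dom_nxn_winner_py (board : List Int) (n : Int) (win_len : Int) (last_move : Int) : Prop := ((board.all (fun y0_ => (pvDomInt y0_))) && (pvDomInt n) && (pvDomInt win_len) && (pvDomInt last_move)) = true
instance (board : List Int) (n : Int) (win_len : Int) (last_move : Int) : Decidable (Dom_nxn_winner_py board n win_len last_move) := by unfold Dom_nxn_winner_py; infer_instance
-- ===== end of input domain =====

-- B materializes, per direction, the clipped in-bounds line through last_move once and measures
-- the player's run around the recorded center on that list, instead of A's two stepwise board walks.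


-- shared transliterations of the Python expressions '0 <= r < n and 0 <= c < n' and 'board[r*n+c]'
def pvOk (n r c : Int) : Bool :=
  decide (0 ≤ r) && decide (r < n) && decide (0 ≤ c) && decide (c < n)

def pvCell (board : List Int) (n r c : Int) : Int :=
  (PySem.List.pyGet? board (r * n + c)).getD 0

-- ===== PORT A =====
-- one inner 'for step in range(1, win_len): … else break' loop of A; fr/fc give the stepped coordinates
def pvWalk (board : List Int) (n player : Int) (fr fc : Int → Int) : List Int → Int
  | [] => 0
  | step :: rest =>
    if pvOk n (fr step) (fc step) = true ∧ pvCell board n (fr step) (fc step) = player then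
      1 + pvWalk board n player fr fc rest
    else 0

-- A's per-direction 'count'
def pvCountA (board : List Int) (n win_len player row col dr dc : Int) : Int :=
  1 + pvWalk board n player (fun s => row + dr * s) (fun s => col + dc * s) (PySem.List.pyRange 1 win_len 1)
    + pvWalk board n player (fun s => row - dr * s) (fun s => col - dc * s) (PySem.List.pyRange 1 win_len 1)

def pvDirsA (board : List Int) (n win_len player row col : Int) : List (Int × Int) → Int
  | [] => 0
  | (dr, dc) :: rest =>
    if win_len ≤ pvCountA board n win_len player row col dr dc then player
    else pvDirsA board n win_len player row col rest

def nxn_winner_py (board : List Int) (n : Int) (win_len : Int) (last_move : Int) : Int :=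
  if last_move < 0 then 0
  else
    let player := (PySem.List.pyGet? board last_move).getD 0
    if player = 0 then 0
    else
      let row := PySem.Int.floordiv last_move n
      let col := PySem.Int.mod last_move n
      pvDirsA board n win_len player row col [(0, 1), (1, 0), (1, 1), (1, -1)]

-- ===== PORT B =====
-- B's line builder: collects the in-bounds cells along the direction, remembering the center's index
def pvBuild (board : List Int) (n row col dr dc : Int) : List Int → List Int → Int → List Int × Int
  | [], cells, center => (cells, center)
  | k :: rest, cells, center =>
    if pvOk n (row + dr * k) (col + dc * k) = true then
      pvBuild board n row col dr dc rest (cells ++ [pvCell board n (row + dr * k) (col + dc * k)])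
        (if k = 0 then (cells.length : Int) else center)
    else pvBuild board n row col dr dc rest cells center

-- B's run_from helper
def pvRunFrom (player : Int) : List Int → Int
  | [] => 0
  | v :: rest => if v = player then 1 + pvRunFrom player rest else 0

-- B's per-direction centered run length
def pvRunB (board : List Int) (n win_len player row col dr dc : Int) : Int :=
  let cc := pvBuild board n row col dr dc (PySem.List.pyRange (-(win_len - 1)) win_len 1) [] 0
  1 + pvRunFrom player (PySem.List.slice cc.1 (some (cc.2 + 1)) none)
    + pvRunFrom player (PySem.List.slice cc.1 none (some cc.2)).reverse

def pvDirsB (board : List Int) (n win_len player row col : Int) : List (Int × Int) → Int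
  | [] => 0
  | (dr, dc) :: rest =>
    if win_len ≤ pvRunB board n win_len player row col dr dc then player
    else pvDirsB board n win_len player row col rest

def nxn_winner_py_alt (board : List Int) (n : Int) (win_len : Int) (last_move : Int) : Int :=
  if last_move < 0 then 0
  else
    let player := (PySem.List.pyGet? board last_move).getD 0
    if player = 0 then 0
    else
      let row := PySem.Int.floordiv last_move n
      let col := PySem.Int.mod last_move n
      pvDirsB board n win_len player row col [(0, 1), (1, 0), (1, 1), (1, -1)]

-- ===== PRECONDITION & SPEC =====
-- Pre_ excludes inputs where A raises (last_move ≥ len(board); n == 0 reached by divmod; a walk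
-- index beyond len(board)) and inputs inconsistent with an n×n board (0 < n but len(board) < n*n
-- or last_move ≥ n*n): on those malformed inputs, outside the function's natural domain, A's
-- bounds-walk value is an accident of its early breaks, and B, which materializes the whole
-- clipped window, may read past the short board and raise IndexError there.
def Pre_nxn_winner_py (board : List Int) (n : Int) (win_len : Int) (last_move : Int) : Prop :=
  last_move < 0 ∨
    (0 ≤ last_move ∧ last_move < (board.length : Int) ∧
      (PySem.List.pyGet? board last_move = some 0 ∨ n < 0 ∨
        (0 < n ∧ n * n ≤ (board.length : Int) ∧ last_move < n * n)))
instance (board : List Int) (n : Int) (win_len : Int) (last_move : Int) : Decidable (Pre_nxn_winner_py board n win_len last_move) := by unfold Pre_nxn_winner_py; infer_instance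

def pvWitness_nxn_winner_py : List Int × Int × Int × Int := ([1, 1, 1, 0, 0, 0, 0, 0, 0], 3, 3, 2)

def Spec_nxn_winner_py (board : List Int) (n : Int) (win_len : Int) (last_move : Int) (out : Int) : Prop := out = nxn_winner_py_alt board n win_len last_move
instance (board : List Int) (n : Int) (win_len : Int) (last_move : Int) (out : Int) : Decidable (Spec_nxn_winner_py board n win_len last_move out) := by unfold Spec_nxn_winner_py; infer_instance

-- ===== CLAIM (what is proved, stated in full; the proofs are below) =====
def Claim_equal_nxn_winner_py : Prop := ∀ (board : List Int) (n : Int) (win_len : Int) (last_move : Int), Dom_nxn_winner_py board n win_len last_move → Pre_nxn_winner_py board n win_len last_move → Spec_nxn_winner_py board n win_len last_move (nxn_winner_py board n win_len last_move)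

-- ===== LEMMAS AND PROOFS =====

theorem pvWitness_ok :
    Dom_nxn_winner_py pvWitness_nxn_winner_py.1 pvWitness_nxn_winner_py.2.1
        pvWitness_nxn_winner_py.2.2.1 pvWitness_nxn_winner_py.2.2.2 ∧
      Pre_nxn_winner_py pvWitness_nxn_winner_py.1 pvWitness_nxn_winner_py.2.1
        pvWitness_nxn_winner_py.2.2.1 pvWitness_nxn_winner_py.2.2.2 := by
  decide

lemma pvWalk_filter (board : List Int) (n player : Int) (fr fc : Int → Int) (l : List Int)
    (h : l.Pairwise (fun a b => pvOk n (fr b) (fc b) = true → pvOk n (fr a) (fc a) = true)) :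
    pvWalk board n player fr fc l =
      pvRunFrom player ((l.filter (fun k => pvOk n (fr k) (fc k))).map
        (fun k => pvCell board n (fr k) (fc k))) := by
  induction l with
  | nil => simp [pvWalk, pvRunFrom]
  | cons k rest ih =>
    rcases List.pairwise_cons.mp h with ⟨hk, hrest⟩
    by_cases hok : pvOk n (fr k) (fc k) = true
    · have hf : List.filter (fun k => pvOk n (fr k) (fc k)) (k :: rest) =
          k :: List.filter (fun k => pvOk n (fr k) (fc k)) rest := by
        simp [hok]
      rw [hf, List.map_cons]
      simp only [pvWalk, pvRunFrom]
      by_cases hv : pvCell board n (fr k) (fc k) = player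
      · rw [if_pos ⟨hok, hv⟩, if_pos hv, ih hrest]
      · rw [if_neg (by tauto), if_neg hv]
    · have hfil : rest.filter (fun k => pvOk n (fr k) (fc k)) = [] := by
        apply List.filter_eq_nil_iff.mpr
        intro b hb hokb
        exact hok (hk b hb hokb)
      have hf : List.filter (fun k => pvOk n (fr k) (fc k)) (k :: rest) = [] := by
        simp [hok, hfil]
      rw [hf]
      simp only [pvWalk, pvRunFrom, List.map_nil]
      rw [if_neg (by tauto)]

lemma pvBuild_append (board : List Int) (n row col dr dc : Int) (l1 l2 cells : List Int) (center : Int) :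
    pvBuild board n row col dr dc (l1 ++ l2) cells center =
      pvBuild board n row col dr dc l2
        (pvBuild board n row col dr dc l1 cells center).1
        (pvBuild board n row col dr dc l1 cells center).2 := by
  induction l1 generalizing cells center with
  | nil => simp [pvBuild]
  | cons k rest ih =>
    simp only [List.cons_append, pvBuild]
    split
    · exact ih _ _
    · exact ih _ _

lemma pvBuild_no_zero (board : List Int) (n row col dr dc : Int) (l cells : List Int) (center : Int)
    (h : ∀ k ∈ l, k ≠ 0) :
    pvBuild board n row col dr dc l cells center =
      (cells ++ (l.filter (fun k => pvOk n (row + dr * k) (col + dc * k))).map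
        (fun k => pvCell board n (row + dr * k) (col + dc * k)), center) := by
  induction l generalizing cells with
  | nil => simp [pvBuild]
  | cons k rest ih =>
    have hk : k ≠ 0 := h k (List.mem_cons_self)
    have hr : ∀ k ∈ rest, k ≠ 0 := fun x hx => h x (List.mem_cons_of_mem _ hx)
    by_cases hok : pvOk n (row + dr * k) (col + dc * k) = true
    · simp only [pvBuild, if_neg hk, ih _ hr, List.filter_cons, hok]
      simp
    · simp only [pvBuild, if_neg hok, ih _ hr]
      simp [hok]

lemma pvBuild_all_bad (board : List Int) (n row col dr dc : Int) (l cells : List Int) (center : Int)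
    (h : ∀ k : Int, pvOk n (row + dr * k) (col + dc * k) = false) :
    pvBuild board n row col dr dc l cells center = (cells, center) := by
  induction l generalizing cells center with
  | nil => simp [pvBuild]
  | cons k rest ih =>
    have hne : pvOk n (row + dr * k) (col + dc * k) ≠ true := by simp [h k]
    simp only [pvBuild, if_neg hne]
    exact ih _ _

lemma pyRange_neg_reverse (w : Int) :
    (PySem.List.pyRange (-(w - 1)) 0 1).reverse =
      (PySem.List.pyRange 1 w 1).map (fun k => -k) := by
  apply List.ext_getElem
  · simp only [List.length_reverse, List.length_map, PySem.List.length_pyRange_one]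
    omega
  · intro i h1 h2
    have hl : (PySem.List.pyRange (-(w - 1)) 0).length = (w - 1).toNat := by
      rw [PySem.List.length_pyRange_one]; omega
    rw [List.getElem_reverse, List.getElem_map, PySem.List.getElem_pyRange_one,
      PySem.List.getElem_pyRange_one]
    have hi : i < (w - 1).toNat := by rw [List.length_reverse, hl] at h1; exact h1
    rw [hl]
    omega

-- the geometric fact: along each of the four directions the in-bounds test is antitone in the step
lemma pvOk_antitone (n row col dr dc a b : Int)
    (hrow : 0 ≤ row ∧ row < n) (hcol : 0 ≤ col ∧ col < n)
    (hd : (dr = 0 ∧ dc = 1) ∨ (dr = 1 ∧ dc = 0) ∨ (dr = 1 ∧ dc = 1) ∨ (dr = 1 ∧ dc = -1))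
    (ha : 1 ≤ a) (hab : a < b) (s : Int) (hs : s = 1 ∨ s = -1) :
    pvOk n (row + s * dr * b) (col + s * dc * b) = true →
      pvOk n (row + s * dr * a) (col + s * dc * a) = true := by
  simp only [pvOk, Bool.and_eq_true, decide_eq_true_eq]
  rcases hd with ⟨h1, h2⟩ | ⟨h1, h2⟩ | ⟨h1, h2⟩ | ⟨h1, h2⟩ <;> subst h1 <;> subst h2 <;>
    rcases hs with hs | hs <;> subst hs <;> intro h <;>
    obtain ⟨⟨⟨g1, g2⟩, g3⟩, g4⟩ := h <;>
    refine ⟨⟨⟨?_, ?_⟩, ?_⟩, ?_⟩ <;> omega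

lemma countA_eq_runB (board : List Int) (n player row col dr dc w : Int)
    (hrow : 0 ≤ row ∧ row < n) (hcol : 0 ≤ col ∧ col < n)
    (hd : (dr = 0 ∧ dc = 1) ∨ (dr = 1 ∧ dc = 0) ∨ (dr = 1 ∧ dc = 1) ∨ (dr = 1 ∧ dc = -1)) :
    pvCountA board n w player row col dr dc = pvRunB board n w player row col dr dc := by
  by_cases hw : w ≤ 0
  · have h1 : PySem.List.pyRange 1 w 1 = [] := PySem.List.pyRange_one_eq_nil (by omega)
    have h2' : PySem.List.pyRange (1 - w) w 1 = [] := PySem.List.pyRange_one_eq_nil (by omega)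
    have es : ∀ (a b : Option Int), PySem.List.slice ([] : List Int) a b = [] := by
      intro a b
      cases a <;> cases b <;> simp [PySem.List.slice, PySem.List.clampIdx]
    simp [pvCountA, pvRunB, h1, h2', pvBuild, pvWalk, pvRunFrom, es]
  -- main case: 1 ≤ w, the window contains the center k = 0
  replace hw : 0 < w := by omega
  have hsplit : PySem.List.pyRange (-(w - 1)) w 1 =
      PySem.List.pyRange (-(w - 1)) 0 1 ++ (0 :: PySem.List.pyRange 1 w 1) := by
    have e1 := PySem.List.pyRange_one_append (-(w - 1)) 0 w (by omega) (by omega)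
    have e2 := PySem.List.pyRange_one_cons (show (0:Int) < w from hw)
    rw [e1, e2]
    norm_num
  -- the materialized pieces
  set okF := fun k => pvOk n (row + dr * k) (col + dc * k) with hokF
  set cellF := fun k => pvCell board n (row + dr * k) (col + dc * k) with hcellF
  set negC := ((PySem.List.pyRange (-(w - 1)) 0 1).filter okF).map cellF with hnegC
  set posC := ((PySem.List.pyRange 1 w 1).filter okF).map cellF with hposC
  have hok0 : okF 0 = true := by
    simp only [hokF, pvOk, mul_zero, add_zero, Bool.and_eq_true, decide_eq_true_eq]
    exact ⟨⟨⟨hrow.1, hrow.2⟩, hcol.1⟩, hcol.2⟩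
  have hbuild : pvBuild board n row col dr dc (PySem.List.pyRange (-(w - 1)) w 1) [] 0 =
      (negC ++ cellF 0 :: posC, (negC.length : Int)) := by
    have hneg0 : ∀ k ∈ PySem.List.pyRange (-(w - 1)) 0 1, k ≠ 0 := by
      intro k hk; have := PySem.List.mem_pyRange_one.mp hk; omega
    have hpos0 : ∀ k ∈ PySem.List.pyRange 1 w 1, k ≠ 0 := by
      intro k hk; have := PySem.List.mem_pyRange_one.mp hk; omega
    have b1 := pvBuild_no_zero board n row col dr dc (PySem.List.pyRange (-(w - 1)) 0 1) [] 0 hneg0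
    rw [hsplit, pvBuild_append, b1]
    simp only [List.nil_append]
    have hok0' : pvOk n (row + dr * 0) (col + dc * 0) = true := by
      simpa [hokF] using hok0
    simp only [pvBuild, if_pos hok0']
    rw [pvBuild_no_zero board n row col dr dc (PySem.List.pyRange 1 w 1) _ _ hpos0]
    simp [hnegC, hposC, hcellF, hokF]
  -- the two slices
  have hdrop : PySem.List.slice (negC ++ cellF 0 :: posC) (some ((negC.length : Int) + 1)) none = posC := by
    rw [PySem.List.slice_from _ (by positivity)]
    have : ((negC.length : Int) + 1).toNat = negC.length + 1 := by omega
    rw [this, show negC ++ cellF 0 :: posC = (negC ++ [cellF 0]) ++ posC by simp,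
      show negC.length + 1 = (negC ++ [cellF 0]).length by simp, List.drop_left]
  have htake : PySem.List.slice (negC ++ cellF 0 :: posC) none (some (negC.length : Int)) = negC := by
    rw [PySem.List.slice_to _ (by positivity)]
    simp
  -- forward walk = run over the forward piece
  have hpair : ∀ s : Int, s = 1 ∨ s = -1 →
      (PySem.List.pyRange 1 w 1).Pairwise
        (fun a b => pvOk n (row + s * dr * b) (col + s * dc * b) = true →
          pvOk n (row + s * dr * a) (col + s * dc * a) = true) := by
    intro s hs
    refine List.Pairwise.imp_of_mem ?_ (PySem.List.pairwise_lt_pyRange_one 1 w)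
    intro a b ha _ hab
    exact pvOk_antitone n row col dr dc a b hrow hcol hd
      (PySem.List.mem_pyRange_one.mp ha).1 hab s hs
  have hwalkF : pvWalk board n player (fun s => row + dr * s) (fun s => col + dc * s)
      (PySem.List.pyRange 1 w 1) = pvRunFrom player posC := by
    rw [pvWalk_filter _ _ _ _ _ _ (by simpa using hpair 1 (Or.inl rfl))]
  -- backward walk = run over the reversed backward piece
  have hnegrev : negC.reverse = ((PySem.List.pyRange 1 w 1).filter
      (fun k => pvOk n (row - dr * k) (col - dc * k))).map
      (fun k => pvCell board n (row - dr * k) (col - dc * k)) := by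
    rw [hnegC, ← List.map_reverse, ← List.filter_reverse, pyRange_neg_reverse,
      List.filter_map, List.map_map]
    have e1 : (okF ∘ fun k => -k) = fun k => pvOk n (row - dr * k) (col - dc * k) := by
      funext k
      simp only [hokF, Function.comp]
      congr 1 <;> ring
    have e2 : (cellF ∘ fun k => -k) = fun k => pvCell board n (row - dr * k) (col - dc * k) := by
      funext k
      simp only [hcellF, Function.comp]
      congr 1 <;> ring
    rw [e1, e2]
  have hwalkB : pvWalk board n player (fun s => row - dr * s) (fun s => col - dc * s)
      (PySem.List.pyRange 1 w 1) = pvRunFrom player negC.reverse := by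
    rw [pvWalk_filter _ _ _ _ _ _ ?_, hnegrev]
    have := hpair (-1) (Or.inr rfl)
    refine this.imp ?_
    intro a b h
    simpa [show ∀ x : Int, row + -1 * dr * x = row - dr * x from fun x => by ring,
      show ∀ x : Int, col + -1 * dc * x = col - dc * x from fun x => by ring] using h
  -- assemble
  rw [pvCountA, pvRunB, hbuild, hwalkF, hwalkB]
  simp only [hdrop, htake]

lemma dirs_congr (board : List Int) (n w player row col : Int) (dirs : List (Int × Int))
    (h : ∀ d ∈ dirs, pvCountA board n w player row col d.1 d.2 =
      pvRunB board n w player row col d.1 d.2) :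
    pvDirsA board n w player row col dirs = pvDirsB board n w player row col dirs := by
  induction dirs with
  | nil => rfl
  | cons d rest ih =>
    obtain ⟨dr, dc⟩ := d
    simp only [pvDirsA, pvDirsB, h (dr, dc) (List.mem_cons_self)]
    split
    · rfl
    · exact ih fun x hx => h x (List.mem_cons_of_mem _ hx)

-- ===== VERDICT (by name: the statement is the Claim_ definition above) =====
theorem nxn_winner_py_spec : Claim_equal_nxn_winner_py := by
  intro board n w lm _ hpre
  unfold Spec_nxn_winner_py nxn_winner_py nxn_winner_py_alt
  by_cases hneg : lm < 0
  · simp [hneg]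
  simp only [if_neg hneg]
  replace hneg : 0 ≤ lm := by omega
  by_cases hz : (PySem.List.pyGet? board lm).getD 0 = 0
  · simp [hz]
  simp only [if_neg hz]
  rcases hpre with h | ⟨_, hlen, hcase⟩
  · omega
  rcases hcase with h0 | hn | ⟨hn, hsq, hlt⟩
  · exact absurd (by rw [h0]; rfl) hz
  · -- n < 0 : no cell is ever in bounds, every direction yields count = run = 1
    apply dirs_congr
    intro ⟨dr, dc⟩ _
    have hallF : ∀ r c : Int, pvOk n r c = false := by
      intro r c
      simp only [pvOk, Bool.and_eq_false_iff, decide_eq_false_iff_not]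
      by_cases h1 : 0 ≤ r
      · left; left; right; omega
      · left; left; left; exact h1
    have hwalk0 : ∀ fr fc : Int → Int, pvWalk board n ((PySem.List.pyGet? board lm).getD 0) fr fc
        (PySem.List.pyRange 1 w 1) = 0 := by
      intro fr fc
      cases hr : PySem.List.pyRange 1 w 1 with
      | nil => simp [pvWalk]
      | cons a rest => simp [pvWalk, hallF]
    have hbuild0 : pvBuild board n (PySem.Int.floordiv lm n) (PySem.Int.mod lm n) dr dc
        (PySem.List.pyRange (-(w - 1)) w 1) [] 0 = ([], 0) :=
      pvBuild_all_bad _ _ _ _ _ _ _ _ _ (fun k => hallF _ _)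
    have hb : (-(w - 1)) = 1 - w := by ring
    rw [hb] at hbuild0
    have es : ∀ (a b : Option Int), PySem.List.slice ([] : List Int) a b = [] := by
      intro a b
      cases a <;> cases b <;> simp [PySem.List.slice, PySem.List.clampIdx]
    simp [pvCountA, pvRunB, hwalk0, hbuild0, pvRunFrom, es]
  · -- main case: a genuine n×n board position
    have hrow : 0 ≤ PySem.Int.floordiv lm n ∧ PySem.Int.floordiv lm n < n := by
      rw [PySem.Int.floordiv_eq_ediv_of_pos hn]
      constructor
      · exact Int.ediv_nonneg hneg (by omega)
      · exact Int.ediv_lt_of_lt_mul hn (by linarith)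
    have hcol : 0 ≤ PySem.Int.mod lm n ∧ PySem.Int.mod lm n < n :=
      ⟨PySem.Int.mod_nonneg lm hn, PySem.Int.mod_lt lm hn⟩
    apply dirs_congr
    intro ⟨dr, dc⟩ hd
    apply countA_eq_runB _ _ _ _ _ _ _ _ hrow hcol
    simp only [List.mem_cons, List.not_mem_nil, or_false, Prod.mk.injEq] at hd
    rcases hd with ⟨h1, h2⟩ | ⟨h1, h2⟩ | ⟨h1, h2⟩ | ⟨h1, h2⟩ <;> subst h1 <;> subst h2 <;> tauto
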